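-- pv_equiv track=rewrite | github.com/Rose-Lin/340_group_pj | data/haverford/scheduling.py | get_dup_time_slot_dict
-- ===== SOURCE A (Python) =====
-- def get_dup_time_slot_dict(time_slots):
--     # take in a dictrionary of time slots and output a dictionary where key is weekdays and value is the list of list of
--     # overlapping time slots.
--     time_slot_grouping = {}
--     time_slot_no_overlapping = {}
--     for days in time_slots.keys():
--         # sort time slots by starting time:
--         sort_by_start = sorted(time_slots[days], key = lambda x: x[0])
--         same_time_list = []
--         diff_time_list = []
--         # sublist is the small group in that day
--         sublist = []
--         for index in range(len(sort_by_start)):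
--             elem = sort_by_start[index]
--             if index == 0:
--                 diff_time_list.append(elem)
--                 sublist = [elem]
--                 latest_end_time = elem[1]
--
--             # if the end time of the previous is later than the start time of this class
--             elif latest_end_time > elem[0]:
--                 sublist.append(elem)
--                 if latest_end_time < elem[1]:
--                     latest_end_time = elem[1]
--
--             # if there is no overlapping, start a new list
--             else:
--                 if len(sublist) > 1:
--                     same_time_list.append(sublist)
--                 sublist = [elem]
--                 diff_time_list.append(elem)
--                 latest_end_time = elem[1]
--
--         # if more than 1 class in cluster, add the cluster into the same group, if just 1 class, no conflict, don't add
--         if len(sublist) > 1: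
--             same_time_list.append(sublist)
--         time_slot_grouping[days] = same_time_list
--         time_slot_no_overlapping[days] = diff_time_list
--     return time_slot_grouping, time_slot_no_overlapping
-- ===== SOURCE B (Python) =====
-- def _split(s):
--     # s is sorted by start time; peel off the maximal leading group whose slots
--     # chain-overlap (each slot starts before the max end of the slots before it
--     # in the group), then recurse on the remainder.
--     if not s:
--         return []
--     k = 1
--     while k < len(s) and max(e for _, e in s[:k]) > s[k][0]:
--         k += 1
--     return [s[:k]] + _split(s[k:])
--
--
-- def get_dup_time_slot_dict(time_slots):
--     # Recursive decomposition: per day, split the sorted slots into maximal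
--     # chain-overlapping groups, then shape the two outputs from the group list.
--     time_slot_grouping = {}
--     time_slot_no_overlapping = {}
--     for day, slots in time_slots.items():
--         groups = _split(sorted(slots, key=lambda x: x[0]))
--         time_slot_grouping[day] = [g for g in groups if len(g) > 1]
--         time_slot_no_overlapping[day] = [g[0] for g in groups]
--     return time_slot_grouping, time_slot_no_overlapping
-- ===== Notes on version B (the rewrite author's own statement) =====
-- stated objective: alternative
-- what changed: Replaces A's single stateful index loop with four accumulators (index==0 special case, running latest_end_time, conditional flushes into two result lists) by a recursive splitter that repeatedly peels off the maximal leading chain-overlapping group of the sorted list (recomputing the prefix max of end times in its scan) and two comprehension passes that shape the group list into the outputs.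
import Mathlib
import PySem

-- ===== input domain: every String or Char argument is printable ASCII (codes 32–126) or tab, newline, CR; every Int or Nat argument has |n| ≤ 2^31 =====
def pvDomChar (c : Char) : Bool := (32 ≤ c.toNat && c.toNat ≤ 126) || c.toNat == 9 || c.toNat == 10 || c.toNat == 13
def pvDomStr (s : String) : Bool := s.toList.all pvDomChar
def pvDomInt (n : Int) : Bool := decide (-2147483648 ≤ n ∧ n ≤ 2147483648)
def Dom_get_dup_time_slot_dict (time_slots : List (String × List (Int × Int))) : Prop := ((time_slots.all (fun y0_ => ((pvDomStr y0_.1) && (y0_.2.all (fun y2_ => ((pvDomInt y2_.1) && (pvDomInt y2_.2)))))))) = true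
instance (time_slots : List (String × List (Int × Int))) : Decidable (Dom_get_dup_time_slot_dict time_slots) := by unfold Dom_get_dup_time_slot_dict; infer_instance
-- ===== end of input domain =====

-- B replaces A's stateful four-accumulator index loop by a recursive splitter that peels off
-- the maximal leading chain-overlapping group of the sorted day list and recurses on the rest,
-- shaping the two outputs from the group list afterwards; objective: alternative.

-- ===== PORT A =====
-- inner loop body for index > 0 (the elif/else branches of A); the index == 0 branch is
-- the initial state set up in pvDayA. State = (same_time_list, diff_time_list, sublist, latest_end_time).
def pvStepA (st : List (List (Int × Int)) × List (Int × Int) × List (Int × Int) × Int)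
    (elem : Int × Int) : List (List (Int × Int)) × List (Int × Int) × List (Int × Int) × Int :=
  let (same, diff, sub, latest) := st
  if latest > elem.1 then
    (same, diff, sub ++ [elem], if latest < elem.2 then elem.2 else latest)
  else
    ((if sub.length > 1 then same ++ [sub] else same), diff ++ [elem], [elem], elem.2)

-- one day of A's outer loop: sort, run the index loop, final flush of sublist
def pvDayA (slots : List (Int × Int)) : List (List (Int × Int)) × List (Int × Int) :=
  match PySem.List.sorted slots (fun x => x.1) with
  | [] => ([], [])
  | e :: rest =>
    let (same, diff, sub, _) := rest.foldl pvStepA ([], [e], [e], e.2)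
    ((if sub.length > 1 then same ++ [sub] else same), diff)

def get_dup_time_slot_dict (time_slots : List (String × List (Int × Int))) :
    (List (String × List (List (Int × Int)))) × (List (String × List (Int × Int))) :=
  time_slots.foldl
    (fun acc p =>
      let (s, d) := pvDayA p.2
      (acc.1 ++ [(p.1, s)], acc.2 ++ [(p.1, d)]))
    ([], [])

-- ===== PORT B =====
-- max(e for _, e in l): max of the end times; l is always nonempty where used, so the
-- default 0 of the empty case is never reached (exact on that domain)
def pvPrefMax (l : List (Int × Int)) : Int :=
  match l.map Prod.snd with
  | [] => 0
  | x :: xs => xs.foldl max x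

-- the while loop of _split: first k ≥ start with no overlap (or len(s))
def pvFirstCut (s : List (Int × Int)) (k : Nat) : Nat :=
  if h : k < s.length then
    if pvPrefMax (s.take k) > (s[k]'h).1 then pvFirstCut s (k + 1) else k
  else k
termination_by s.length - k

theorem pvFirstCut_ge (s : List (Int × Int)) (k : Nat) : k ≤ pvFirstCut s k := by
  unfold pvFirstCut
  split
  · split
    · exact Nat.le_of_succ_le (pvFirstCut_ge s (k + 1))
    · exact Nat.le_refl k
  · exact Nat.le_refl k
termination_by s.length - k

-- _split: peel off the maximal leading chain-overlapping group, recurse on the rest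
def pvSplit (s : List (Int × Int)) : List (List (Int × Int)) :=
  match _h : s with
  | [] => []
  | _ :: _ =>
    let k := pvFirstCut s 1
    [s.take k] ++ pvSplit (s.drop k)
termination_by s.length
decreasing_by
  have h1 : 1 ≤ pvFirstCut s 1 := pvFirstCut_ge s 1
  simp_all [List.length_drop]

def get_dup_time_slot_dict_alt (time_slots : List (String × List (Int × Int))) :
    (List (String × List (List (Int × Int)))) × (List (String × List (Int × Int))) :=
  time_slots.foldl
    (fun acc p =>
      let groups := pvSplit (PySem.List.sorted p.2 (fun x => x.1))
      (acc.1 ++ [(p.1, groups.filter (fun g => g.length > 1))],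
       -- g[0]: every group is nonempty, so headD's default is never used
       acc.2 ++ [(p.1, groups.map (fun g => g.headD (0, 0)))]))
    ([], [])

-- ===== PRECONDITION & SPEC =====
def Spec_get_dup_time_slot_dict (time_slots : List (String × List (Int × Int))) (out : (List (String × List (List (Int × Int)))) × (List (String × List (Int × Int)))) : Prop := out = get_dup_time_slot_dict_alt time_slots
instance (time_slots : List (String × List (Int × Int))) (out : (List (String × List (List (Int × Int)))) × (List (String × List (Int × Int)))) : Decidable (Spec_get_dup_time_slot_dict time_slots out) := by unfold Spec_get_dup_time_slot_dict; infer_instance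

-- ===== CLAIM (what is proved, stated in full; the proofs are below) =====
def Claim_equal_get_dup_time_slot_dict : Prop := ∀ (time_slots : List (String × List (Int × Int))), Dom_get_dup_time_slot_dict time_slots → Spec_get_dup_time_slot_dict time_slots (get_dup_time_slot_dict time_slots)

-- ===== LEMMAS AND PROOFS =====

-- proof-side intermediary: the classic merge sweep, to which both A's loop and B's splitter reduce
def pvStepS (st : List (List (Int × Int)) × Option (List (Int × Int) × Int))
    (elem : Int × Int) : List (List (Int × Int)) × Option (List (Int × Int) × Int) :=
  match st with
  | (clusters, none) => (clusters, some ([elem], elem.2))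
  | (clusters, some (cur, latest)) =>
    if latest ≤ elem.1 then (clusters ++ [cur], some ([elem], elem.2))
    else (clusters, some (cur ++ [elem], max latest elem.2))

def pvSweep (l : List (Int × Int)) : List (List (Int × Int)) :=
  match l.foldl pvStepS ([], none) with
  | (clusters, none) => clusters
  | (clusters, some (cur, _)) => clusters ++ [cur]

-- ---- A reduces to the sweep ----

-- abstraction: read A's loop state off the sweep state (with an open current cluster)
def pvAbs (cls : List (List (Int × Int))) (cur : List (Int × Int)) (latest : Int) :
    List (List (Int × Int)) × List (Int × Int) × List (Int × Int) × Int :=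
  (cls.filter (fun c => c.length > 1), (cls ++ [cur]).map (fun c => c.headD (0, 0)), cur, latest)

theorem pvSim (l : List (Int × Int)) : ∀ (cls : List (List (Int × Int)))
    (cur : List (Int × Int)) (latest : Int), cur ≠ [] →
    l.foldl pvStepA (pvAbs cls cur latest) =
      (match l.foldl pvStepS (cls, some (cur, latest)) with
       | (cls', none) => pvAbs cls' [] 0   -- unreachable
       | (cls', some (cur', lat')) => pvAbs cls' cur' lat') := by
  induction l with
  | nil => intro cls cur latest h; rfl
  | cons e t ih =>
    intro cls cur latest hcur
    simp only [List.foldl_cons]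
    by_cases hle : latest ≤ e.1
    · have hA : pvStepA (pvAbs cls cur latest) e = pvAbs (cls ++ [cur]) [e] e.2 := by
        simp only [pvStepA, pvAbs]
        rw [if_neg (by omega)]
        simp [List.filter_append, List.map_append]
        split_ifs with h1 <;> simp [h1]
      have hB : pvStepS (cls, some (cur, latest)) e = (cls ++ [cur], some ([e], e.2)) := by
        simp [pvStepS, hle]
      rw [hA, hB, ih (cls ++ [cur]) [e] e.2 (by simp)]
    · have hA : pvStepA (pvAbs cls cur latest) e = pvAbs cls (cur ++ [e]) (max latest e.2) := by
        simp only [pvStepA, pvAbs]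
        rw [if_pos (by omega)]
        have hmax : (if latest < e.2 then e.2 else latest) = max latest e.2 := by
          split_ifs with h <;> omega
        obtain ⟨a, t2, rfl⟩ := List.exists_cons_of_ne_nil hcur
        simp [hmax]
      have hB : pvStepS (cls, some (cur, latest)) e = (cls, some (cur ++ [e], max latest e.2)) := by
        simp [pvStepS, hle]
      rw [hA, hB, ih cls (cur ++ [e]) (max latest e.2) (by simp)]

theorem pvFoldS_some (l : List (Int × Int)) : ∀ cls cur latest,
    ∃ cls' cur' lat', l.foldl pvStepS (cls, some (cur, latest)) = (cls', some (cur', lat')) := by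
  induction l with
  | nil => intro cls cur latest; exact ⟨cls, cur, latest, rfl⟩
  | cons e t ih =>
    intro cls cur latest
    simp only [List.foldl_cons, pvStepS]
    split_ifs with h
    · exact ih _ _ _
    · exact ih _ _ _

theorem pvDayA_eq (slots : List (Int × Int)) :
    pvDayA slots = ((pvSweep (PySem.List.sorted slots (fun x => x.1))).filter (fun c => c.length > 1),
                    (pvSweep (PySem.List.sorted slots (fun x => x.1))).map (fun c => c.headD (0, 0))) := by
  unfold pvDayA pvSweep
  cases hs : PySem.List.sorted slots (fun x => x.1) with
  | nil => rfl
  | cons e rest =>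
    simp only [List.foldl_cons]
    have h0 : pvStepS (([], none) : List (List (Int × Int)) × Option (List (Int × Int) × Int)) e
        = ([], some ([e], e.2)) := rfl
    rw [h0]
    obtain ⟨cls', cur', lat', hB⟩ := pvFoldS_some rest [] [e] e.2
    have hstart : (([], [e], [e], e.2) : List (List (Int × Int)) × List (Int × Int) × List (Int × Int) × Int)
        = pvAbs [] [e] e.2 := rfl
    rw [hstart, pvSim rest [] [e] e.2 (by simp), hB]
    simp only [pvAbs, List.filter_append, List.map_append]
    split_ifs with h1 <;> simp [h1]

-- ---- B reduces to the sweep ----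

theorem pvPrefMax_singleton (e : Int × Int) : pvPrefMax [e] = e.2 := rfl

theorem pvPrefMax_append (cur : List (Int × Int)) (e : Int × Int) (h : cur ≠ []) :
    pvPrefMax (cur ++ [e]) = max (pvPrefMax cur) e.2 := by
  obtain ⟨a, t, rfl⟩ := List.exists_cons_of_ne_nil h
  simp [pvPrefMax, List.foldl_append]

-- structural mirror of the sweep on one segment, phrased with pvPrefMax
def pvSegSplit (cur : List (Int × Int)) (t : List (Int × Int)) : List (List (Int × Int)) :=
  match t with
  | [] => [cur]
  | e :: t' => if pvPrefMax cur ≤ e.1 then cur :: pvSegSplit [e] t' else pvSegSplit (cur ++ [e]) t'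

theorem pvSweepSeg (t : List (Int × Int)) : ∀ cls cur, cur ≠ [] →
    (match t.foldl pvStepS (cls, some (cur, pvPrefMax cur)) with
     | (c, none) => c
     | (c, some (u, _)) => c ++ [u]) = cls ++ pvSegSplit cur t := by
  induction t with
  | nil => intro cls cur h; rfl
  | cons e t' ih =>
    intro cls cur h
    simp only [List.foldl_cons, pvStepS, pvSegSplit]
    by_cases hle : pvPrefMax cur ≤ e.1
    · rw [if_pos hle, if_pos hle]
      have := ih (cls ++ [cur]) [e] (by simp)
      rw [pvPrefMax_singleton] at this
      rw [this, List.append_assoc]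
      rfl
    · rw [if_neg hle, if_neg hle]
      have := ih cls (cur ++ [e]) (by simp)
      rw [pvPrefMax_append cur e h] at this
      rw [this]

theorem pvSweep_eq_seg (e : Int × Int) (t : List (Int × Int)) :
    pvSweep (e :: t) = pvSegSplit [e] t := by
  unfold pvSweep
  simp only [List.foldl_cons]
  have h0 : pvStepS (([], none) : List (List (Int × Int)) × Option (List (Int × Int) × Int)) e
      = ([], some ([e], pvPrefMax [e])) := rfl
  rw [h0]
  have := pvSweepSeg t [] [e] (by simp)
  rw [this, List.nil_append]

-- how far the splitter's while loop merges, structurally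
def pvMergeLen (cur : List (Int × Int)) (t : List (Int × Int)) : Nat :=
  match t with
  | [] => 0
  | e :: t' => if pvPrefMax cur ≤ e.1 then 0 else pvMergeLen (cur ++ [e]) t' + 1

theorem pvFirstCut_eq (rest : List (Int × Int)) : ∀ cur : List (Int × Int), cur ≠ [] →
    pvFirstCut (cur ++ rest) cur.length = cur.length + pvMergeLen cur rest := by
  induction rest with
  | nil =>
    intro cur h
    unfold pvFirstCut
    simp [pvMergeLen]
  | cons e t' ih =>
    intro cur h
    unfold pvFirstCut
    have hlt : cur.length < (cur ++ e :: t').length := by simp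
    rw [dif_pos hlt]
    have htake : (cur ++ e :: t').take cur.length = cur := by
      simp
    have hget : (cur ++ e :: t')[cur.length]'hlt = e := by
      simp
    rw [htake, hget]
    by_cases hc : pvPrefMax cur > e.1
    · rw [if_pos hc]
      have hre : cur ++ e :: t' = (cur ++ [e]) ++ t' := by simp
      have hlen : cur.length + 1 = (cur ++ [e]).length := by simp
      rw [hre, hlen, ih (cur ++ [e]) (by simp)]
      simp [pvMergeLen, Int.not_le.mpr hc]
      omega
    · rw [if_neg hc]
      have hle : pvPrefMax cur ≤ e.1 := Int.not_lt.mp hc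
      simp [pvMergeLen, hle]

theorem pvSplit_nil : pvSplit [] = [] := by
  rw [pvSplit.eq_def]

theorem pvSplit_cons (e : Int × Int) (t : List (Int × Int)) :
    pvSplit (e :: t) = (e :: t.take (pvMergeLen [e] t)) :: pvSplit (t.drop (pvMergeLen [e] t)) := by
  rw [pvSplit.eq_def]
  have hk : pvFirstCut (e :: t) 1 = 1 + pvMergeLen [e] t := by
    have := pvFirstCut_eq t [e] (by simp)
    simpa using this
  simp only [hk]
  have h1 : 1 + pvMergeLen [e] t = pvMergeLen [e] t + 1 := by omega
  rw [h1]
  simp [List.take_succ_cons, List.drop_succ_cons]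

theorem pvSegSplit_eq (t : List (Int × Int)) : ∀ cur : List (Int × Int), cur ≠ [] →
    pvSegSplit cur t = (cur ++ t.take (pvMergeLen cur t)) :: pvSplit (t.drop (pvMergeLen cur t)) := by
  induction t with
  | nil => intro cur h; simp [pvSegSplit, pvMergeLen, pvSplit_nil]
  | cons e t' ih =>
    intro cur h
    by_cases hle : pvPrefMax cur ≤ e.1
    · simp only [pvSegSplit, pvMergeLen, if_pos hle, List.take_zero, List.drop_zero,
        List.append_nil]
      rw [ih [e] (by simp), pvSplit_cons e t']
      simp
    · simp only [pvSegSplit, pvMergeLen, if_neg hle]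
      have hrec := ih (cur ++ [e]) (by simp)
      rw [hrec]
      simp [List.take_succ_cons, List.drop_succ_cons, List.append_assoc]

theorem pvSweep_eq_split (l : List (Int × Int)) : pvSweep l = pvSplit l := by
  cases l with
  | nil => rw [pvSplit_nil]; rfl
  | cons e t =>
    rw [pvSweep_eq_seg, pvSegSplit_eq t [e] (by simp), pvSplit_cons]
    simp

-- ---- the two outer folds agree ----

theorem pvOuter (ts : List (String × List (Int × Int))) :
    ∀ (a1 : List (String × List (List (Int × Int)))) (a2 : List (String × List (Int × Int))),
    ts.foldl (fun acc p => let (s, d) := pvDayA p.2; (acc.1 ++ [(p.1, s)], acc.2 ++ [(p.1, d)])) (a1, a2)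
      = ts.foldl (fun acc p =>
          let groups := pvSplit (PySem.List.sorted p.2 (fun x => x.1))
          (acc.1 ++ [(p.1, groups.filter (fun g => g.length > 1))],
           acc.2 ++ [(p.1, groups.map (fun g => g.headD (0, 0)))])) (a1, a2) := by
  induction ts with
  | nil => intro a1 a2; rfl
  | cons p t ih =>
    intro a1 a2
    simp only [List.foldl_cons]
    rw [pvDayA_eq p.2, pvSweep_eq_split]
    exact ih _ _

-- ===== VERDICT (by name: the statement is the Claim_ definition above) =====
theorem get_dup_time_slot_dict_spec : Claim_equal_get_dup_time_slot_dict := by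
  intro ts _
  unfold Spec_get_dup_time_slot_dict get_dup_time_slot_dict get_dup_time_slot_dict_alt
  exact pvOuter ts [] []
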